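-- pv_equiv track=rewrite | github.com/jin-ryu/Algorithm-Team-Notes | CodingTest/2020NaverMainPlatformBackend/3.py | solution
-- ===== SOURCE A (Python) =====
-- def solution(N):
--     # write your code in Python 3.6
--     flag = 0
--     if N < 0:
--         N = -N
--         flag = 1
--
--     mylist = [int(i) for i in str(N)]
--
--     for i in range(len(mylist)):
--         if flag == 0 and mylist[i] < 5:
--             mylist.insert(i, 5)
--             break
--         if flag == 1 and mylist[i] > 5:
--             mylist.insert(i, 5)
--             break
--     else:
--         mylist.insert(len(mylist), 5)
--
--     answer = int("".join(map(str, mylist)))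
--     if flag:
--         answer = -answer
--
--     return answer
-- ===== SOURCE B (Python) =====
-- def solution(N):
--     digits = str(abs(N))
--     cands = [digits[:i] + "5" + digits[i:] for i in range(len(digits) + 1)]
--     if N >= 0:
--         return int(max(cands))
--     return -int(min(cands))
-- ===== Notes on version B (the rewrite author's own statement) =====
-- stated objective: alternative
-- what changed: A's single greedy scan that inserts the digit five before the first digit breaking the order is replaced by brute force: build every possible insertion of the new digit into str(abs(N)) and take the lexicographically extremal candidate string (max for nonnegative N, min for negative N; equal-length digit strings compare numerically).
import Mathlib
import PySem

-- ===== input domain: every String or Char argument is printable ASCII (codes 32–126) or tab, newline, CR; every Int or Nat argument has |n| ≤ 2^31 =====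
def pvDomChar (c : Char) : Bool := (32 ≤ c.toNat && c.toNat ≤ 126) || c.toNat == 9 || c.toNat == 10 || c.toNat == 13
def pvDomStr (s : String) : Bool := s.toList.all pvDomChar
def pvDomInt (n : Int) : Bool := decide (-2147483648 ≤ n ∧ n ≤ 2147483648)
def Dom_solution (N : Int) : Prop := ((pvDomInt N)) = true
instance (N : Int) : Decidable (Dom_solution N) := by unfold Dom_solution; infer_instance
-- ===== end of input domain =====

-- B replaces A's one-pass greedy scan-and-insert with brute force over every insertion
-- position, choosing the extremal candidate string lexicographically (objective: alternative).

-- ===== PORT A =====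
-- the for/break/else loop of A: scan indices from i; first index whose digit matches the
-- flag's condition gets 5 inserted there (break); falling off the end appends (for-else).
def solutionLoopA (flag : Int) (l : List Int) (i : Nat) : List Int :=
  if h : i < l.length then
    if flag == 0 && decide (l[i] < 5) then PySem.List.insert l (i : Int) 5
    else if flag == 1 && decide (l[i] > 5) then PySem.List.insert l (i : Int) 5
    else solutionLoopA flag l (i + 1)
  else
    -- for-else: mylist.insert(len(mylist), 5)
    PySem.List.insert l (PySem.List.len l) 5
termination_by l.length - i

def solution (N : Int) : Int :=
  let flag : Int := if N < 0 then 1 else 0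
  let M : Int := if N < 0 then -N else N
  -- [int(i) for i in str(N)]: every i is one digit char of str(M), M ≥ 0, so int(i) never
  -- raises; the getD 0 default is unreachable
  let mylist : List Int := (PySem.Int.toChars M).map (fun c => (PySem.Int.ofChars? [c]).getD 0)
  let mylist' : List Int := solutionLoopA flag mylist 0
  -- int("".join(map(str, mylist))): a nonempty all-digit string, never raises (getD 0 unreachable)
  let answer : Int := (PySem.Int.ofChars? (PySem.Chars.join [] (mylist'.map PySem.Int.toChars))).getD 0
  if flag == 1 then -answer else answer

-- ===== PORT B =====
def solution_alt (N : Int) : Int :=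
  let digits : List Char := PySem.Int.toChars |N|       -- str(abs(N))
  let cands : List (List Char) :=
    (PySem.List.pyRange 0 ((digits.length : Int) + 1)).map
      (fun i => PySem.List.slice digits none (some i) ++ ['5'] ++ PySem.List.slice digits (some i) none)
  -- max/min on nonempty cands never raises (getD [] unreachable); int(...) on an all-digit
  -- string never raises (getD 0 unreachable)
  if N ≥ 0 then (PySem.Int.ofChars? ((PySem.List.max? cands (fun s => s)).getD [])).getD 0
  else -((PySem.Int.ofChars? ((PySem.List.min? cands (fun s => s)).getD [])).getD 0)

-- ===== PRECONDITION & SPEC =====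
def Spec_solution (N : Int) (out : Int) : Prop := out = solution_alt N
instance (N : Int) (out : Int) : Decidable (Spec_solution N out) := by unfold Spec_solution; infer_instance

-- ===== CLAIM (what is proved, stated in full; the proofs are below) =====
def Claim_equal_solution : Prop := ∀ (N : Int), Dom_solution N → Spec_solution N (solution N)

-- ===== LEMMAS AND PROOFS =====

/-- Insert `x` at position `k` (list form of Python's `l.insert(k, x)`, `k ≤ len`). -/
def insAt {α : Type} (k : Nat) (x : α) (l : List α) : List α := l.take k ++ x :: l.drop k

/-- The ten decimal digit characters. -/
def digitChars : List Char := ['0','1','2','3','4','5','6','7','8','9']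

/-- A's per-character `int(i)`. -/
def cval (c : Char) : Int := (PySem.Int.ofChars? [c]).getD 0

lemma cval_lt5 (c : Char) (h : c ∈ digitChars) : decide (cval c < 5) = decide (c < '5') := by
  fin_cases h <;> decide

lemma cval_gt5 (c : Char) (h : c ∈ digitChars) : decide (cval c > 5) = decide (c > '5') := by
  fin_cases h <;> decide

lemma findIdx_congr_mem {α : Type} (p q : α → Bool) (l : List α) (h : ∀ c ∈ l, p c = q c) :
    l.findIdx p = l.findIdx q := by
  induction l with
  | nil => rfl
  | cons a t ih =>
    simp only [List.findIdx_cons, h a (by simp),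
      ih (fun c hc => h c (List.mem_cons_of_mem a hc))]


lemma digitChar_mem (m : Nat) (h : m < 10) : m.digitChar ∈ digitChars := by
  interval_cases m <;> decide

lemma toDigitsCore_mem (fuel : Nat) : ∀ (n : Nat) (acc : List Char), (∀ c ∈ acc, c ∈ digitChars) →
    ∀ c ∈ Nat.toDigitsCore 10 fuel n acc, c ∈ digitChars := by
  induction fuel with
  | zero => intro n acc hacc c hc; rw [Nat.toDigitsCore.eq_def] at hc; exact hacc c hc
  | succ f ih =>
    intro n acc hacc c hc
    rw [Nat.toDigitsCore.eq_def] at hc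
    simp only [] at hc
    split at hc
    · rcases List.mem_cons.mp hc with h | h
      · exact h ▸ digitChar_mem _ (Nat.mod_lt _ (by norm_num))
      · exact hacc c h
    · exact ih _ _ (fun c hc => by
        rcases List.mem_cons.mp hc with h | h
        · exact h ▸ digitChar_mem _ (Nat.mod_lt _ (by norm_num))
        · exact hacc c h) c hc

lemma toChars_mem (M : Int) (hM : 0 ≤ M) : ∀ c ∈ PySem.Int.toChars M, c ∈ digitChars := by
  rw [PySem.Int.toChars, if_neg (by omega)]
  exact toDigitsCore_mem _ _ [] (by simp) 

lemma toChars_cval (c : Char) (h : c ∈ digitChars) : PySem.Int.toChars (cval c) = [c] := by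
  fin_cases h <;> decide

lemma mem_insAt {α : Type} (k : Nat) (x c : α) (l : List α) (h : c ∈ insAt k x l) :
    c = x ∨ c ∈ l := by
  simp only [insAt, List.mem_append, List.mem_cons] at h
  rcases h with h | h | h
  · exact Or.inr (List.mem_of_mem_take h)
  · exact Or.inl h
  · exact Or.inr (List.mem_of_mem_drop h)

lemma insAt_map {α β : Type} (f : α → β) (k : Nat) (x : α) (l : List α) :
    (insAt k x l).map f = insAt k (f x) (l.map f) := by
  simp [insAt, List.map_take, List.map_drop]

lemma joinA_eq (cs : List Char) (hcs : ∀ c ∈ cs, c ∈ digitChars) (k : Nat) :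
    PySem.Chars.join [] ((insAt k 5 (cs.map cval)).map PySem.Int.toChars) = insAt k '5' cs := by
  have h5 : cval '5' = 5 := by decide
  rw [show insAt k 5 (cs.map cval) = (insAt k '5' cs).map cval by rw [insAt_map, h5]]
  rw [List.map_map]
  rw [List.map_congr_left (f := PySem.Int.toChars ∘ cval) (g := fun c => [c])
    (fun c hc => by
      rcases mem_insAt _ _ _ _ hc with h | h
      · exact h ▸ toChars_cval '5' (by decide)
      · exact toChars_cval c (hcs c h))]
  exact PySem.Chars.join_nil_singletons (insAt k '5' cs)


lemma insAt_succ_cons {α : Type} (j : Nat) (x c : α) (t : List α) :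
    insAt (j + 1) x (c :: t) = c :: insAt j x t := by
  simp [insAt]

lemma insAt_zero {α : Type} (x : α) (l : List α) : insAt 0 x l = x :: l := by
  simp [insAt]

lemma insAt_le_greedy {α : Type} [LinearOrder α] (x : α) :
    ∀ (l : List α) (i : Nat), i ≤ l.length →
      insAt i x l ≤ insAt (l.findIdx (fun c => decide (c < x))) x l := by
  intro l
  induction l with
  | nil =>
    intro i hi
    have h0 : i = 0 := Nat.le_zero.mp hi
    subst h0; exact le_refl _
  | cons c t ih =>
    intro i hi
    rw [List.findIdx_cons]
    by_cases hc : c < x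
    · simp only [hc, decide_true, cond_true]
      match i with
      | 0 => exact le_refl _
      | j + 1 =>
        rw [insAt_succ_cons, insAt_zero]
        exact le_of_lt (List.cons_lt_cons_iff.mpr (Or.inl hc))
    · simp only [hc, decide_false, cond_false]
      rw [insAt_succ_cons]
      match i with
      | 0 =>
        rw [insAt_zero]
        rcases lt_or_eq_of_le (le_of_not_gt hc) with hxc | hxc
        · exact le_of_lt (List.cons_lt_cons_iff.mpr (Or.inl hxc))
        · subst hxc
          rw [show (x :: x :: t : List α) = x :: insAt 0 x t by rw [insAt_zero]]
          exact List.cons_le_cons x (ih 0 (Nat.zero_le _))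
      | j + 1 =>
        rw [insAt_succ_cons]
        exact List.cons_le_cons c (ih j (by simpa using hi))

lemma greedy_le_insAt {α : Type} [LinearOrder α] (x : α) :
    ∀ (l : List α) (i : Nat), i ≤ l.length →
      insAt (l.findIdx (fun c => decide (x < c))) x l ≤ insAt i x l := by
  intro l
  induction l with
  | nil =>
    intro i hi
    have h0 : i = 0 := Nat.le_zero.mp hi
    subst h0; exact le_refl _
  | cons c t ih =>
    intro i hi
    rw [List.findIdx_cons]
    by_cases hc : x < c
    · simp only [hc, decide_true, cond_true]
      match i with
      | 0 => exact le_refl _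
      | j + 1 =>
        rw [insAt_succ_cons, insAt_zero]
        exact le_of_lt (List.cons_lt_cons_iff.mpr (Or.inl hc))
    · simp only [hc, decide_false, cond_false]
      rw [insAt_succ_cons]
      match i with
      | 0 =>
        rw [insAt_zero]
        rcases lt_or_eq_of_le (le_of_not_gt hc) with hxc | hxc
        · exact le_of_lt (List.cons_lt_cons_iff.mpr (Or.inl hxc))
        · subst hxc
          rw [show (c :: c :: t : List α) = c :: insAt 0 c t by rw [insAt_zero]]
          exact List.cons_le_cons c (ih 0 (Nat.zero_le _))
      | j + 1 =>
        rw [insAt_succ_cons]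
        exact List.cons_le_cons c (ih j (by simpa using hi))

lemma cands_eq (cs : List Char) :
    (PySem.List.pyRange 0 ((cs.length : Int) + 1)).map
      (fun i => PySem.List.slice cs none (some i) ++ ['5'] ++ PySem.List.slice cs (some i) none)
    = (List.range (cs.length + 1)).map (fun k => insAt k '5' cs) := by
  rw [show ((cs.length : Int) + 1) = ((cs.length + 1 : Nat) : Int) by push_cast; ring]
  rw [PySem.List.pyRange_zero_natCast, List.map_map]
  refine List.map_congr_left ?_
  intro k _
  simp only [Function.comp_apply]
  rw [PySem.List.slice_to_natCast, PySem.List.slice_from cs (Int.natCast_nonneg k)]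
  simp [insAt]

lemma max_cands (cs : List Char) :
    (PySem.List.max? ((List.range (cs.length + 1)).map (fun k => insAt k '5' cs)) (fun s => s)).getD []
      = insAt (cs.findIdx (fun c => decide (c < '5'))) '5' cs := by
  set L := (List.range (cs.length + 1)).map (fun k => insAt k '5' cs) with hL
  have hne : L ≠ [] := by simp [hL]
  obtain ⟨m, hm⟩ : ∃ m, PySem.List.max? L (fun s => s) = some m := by
    cases h : PySem.List.max? L (fun s => s) with
    | none => exact absurd ((PySem.List.max?_eq_none_iff L _).mp h) hne
    | some m => exact ⟨m, rfl⟩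
  have hmem := PySem.List.max?_mem hm
  obtain ⟨k0, hk0, hk0m⟩ : ∃ k0, k0 < cs.length + 1 ∧ insAt k0 '5' cs = m := by
    rw [hL] at hmem
    simpa using hmem
  have hgmem : insAt (cs.findIdx (fun c => decide (c < '5'))) '5' cs ∈ L := by
    rw [hL]
    refine List.mem_map.mpr ⟨cs.findIdx (fun c => decide (c < '5')), ?_, rfl⟩
    simpa using Nat.lt_succ_of_le List.findIdx_le_length
  have h1 : m ≤ insAt (cs.findIdx (fun c => decide (c < '5'))) '5' cs := by
    rw [← hk0m]
    exact insAt_le_greedy '5' cs k0 (by omega)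
  have hInst : (fun (a b : List Char) => a.decidableLT b)
      = (inferInstance : LinearOrder (List Char)).toDecidableLT := by
    funext a b; exact Subsingleton.elim _ _
  have hm' := hm
  rw [hInst] at hm'
  have h2 := PySem.List.max?_isMax hm' _ hgmem
  rw [hm]
  exact le_antisymm h1 h2

lemma min_cands (cs : List Char) :
    (PySem.List.min? ((List.range (cs.length + 1)).map (fun k => insAt k '5' cs)) (fun s => s)).getD []
      = insAt (cs.findIdx (fun c => decide ('5' < c))) '5' cs := by
  set L := (List.range (cs.length + 1)).map (fun k => insAt k '5' cs) with hL
  have hne : L ≠ [] := by simp [hL]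
  obtain ⟨m, hm⟩ : ∃ m, PySem.List.min? L (fun s => s) = some m := by
    cases h : PySem.List.min? L (fun s => s) with
    | none => exact absurd ((PySem.List.min?_eq_none_iff L _).mp h) hne
    | some m => exact ⟨m, rfl⟩
  have hmem := PySem.List.min?_mem hm
  obtain ⟨k0, hk0, hk0m⟩ : ∃ k0, k0 < cs.length + 1 ∧ insAt k0 '5' cs = m := by
    rw [hL] at hmem
    simpa using hmem
  have hgmem : insAt (cs.findIdx (fun c => decide ('5' < c))) '5' cs ∈ L := by
    rw [hL]
    refine List.mem_map.mpr ⟨cs.findIdx (fun c => decide ('5' < c)), ?_, rfl⟩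
    simpa using Nat.lt_succ_of_le List.findIdx_le_length
  have h1 : insAt (cs.findIdx (fun c => decide ('5' < c))) '5' cs ≤ m := by
    rw [← hk0m]
    exact greedy_le_insAt '5' cs k0 (by omega)
  have hInst : (fun (a b : List Char) => a.decidableLT b)
      = (inferInstance : LinearOrder (List Char)).toDecidableLT := by
    funext a b; exact Subsingleton.elim _ _
  have hm' := hm
  rw [hInst] at hm'
  have h2 := PySem.List.min?_isMin hm' _ hgmem
  rw [hm]
  exact le_antisymm h2 h1

lemma insAt_eq_pyInsert (l : List Int) (k : Nat) (hk : k ≤ l.length) :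
    PySem.List.insert l (k : Int) 5 = insAt k 5 l := by
  rw [PySem.List.insert_natCast l k 5 hk]; rfl

lemma loopA_spec (flag : Int) (p : Int → Bool)
    (hp : ∀ d : Int, ((flag == 0 && decide (d < 5)) || (flag == 1 && decide (d > 5))) = p d) :
    ∀ (l : List Int) (i : Nat), i ≤ l.length →
      solutionLoopA flag l i = insAt (i + (l.drop i).findIdx p) 5 l := by
  intro l
  suffices H : ∀ (n i : Nat), i ≤ l.length → l.length - i = n →
      solutionLoopA flag l i = insAt (i + (l.drop i).findIdx p) 5 l by
    intro i hi; exact H _ i hi rfl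
  intro n
  induction n with
  | zero =>
    intro i hi hn
    have hil : i = l.length := by omega
    subst hil
    rw [solutionLoopA]
    rw [dif_neg (by omega)]
    rw [PySem.List.insert_len]
    simp [insAt]
  | succ n ih =>
    intro i hi hn
    have hil : i < l.length := by omega
    rw [solutionLoopA, dif_pos hil]
    rw [List.drop_eq_getElem_cons hil, List.findIdx_cons]
    by_cases h1 : (flag == 0 && decide ((l[i]'hil) < 5)) = true
    · rw [if_pos h1]
      have hpd : p (l[i]'hil) = true := by rw [← hp]; exact Or.inl h1 |> Bool.or_eq_true_iff.mpr
      rw [hpd, cond_true, Nat.add_zero]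
      exact insAt_eq_pyInsert l i (le_of_lt hil)
    · rw [if_neg h1]
      by_cases h2 : (flag == 1 && decide ((l[i]'hil) > 5)) = true
      · rw [if_pos h2]
        have hpd : p (l[i]'hil) = true := by rw [← hp]; exact Or.inr h2 |> Bool.or_eq_true_iff.mpr
        rw [hpd, cond_true, Nat.add_zero]
        exact insAt_eq_pyInsert l i (le_of_lt hil)
      · have hpd : p (l[i]'hil) = false := by
          rw [← hp]
          simp only [Bool.or_eq_false_iff]
          exact ⟨Bool.eq_false_iff.mpr h1, Bool.eq_false_iff.mpr h2⟩
        rw [if_neg h2, hpd, cond_false]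
        rw [ih (i + 1) (by omega) (by omega)]
        congr 1
        omega


-- ===== VERDICT (by name: the statement is the Claim_ definition above) =====
lemma main_pos (N : Int) (hN : ¬ N < 0) : solution N = solution_alt N := by
  have hcv : (fun c => (PySem.Int.ofChars? [c]).getD 0) = cval := rfl
  have habs : |N| = N := abs_of_nonneg (by omega)
  have hdig := toChars_mem N (by omega)
  set cs := PySem.Int.toChars N with hcs
  have hp0 : ∀ d : Int, (((0:Int) == 0 && decide (d < 5)) || ((0:Int) == 1 && decide (d > 5)))
      = decide (d < 5) := by intro d; simp
  have hloop := loopA_spec 0 (fun d => decide (d < 5)) hp0 (cs.map cval) 0 (Nat.zero_le _)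
  rw [List.drop_zero, Nat.zero_add] at hloop
  have hfind : (cs.map cval).findIdx (fun d => decide (d < 5))
      = cs.findIdx (fun c => decide (c < '5')) := by
    rw [List.findIdx_map]
    exact findIdx_congr_mem _ _ cs (fun c hc => cval_lt5 c (hdig c hc))
  rw [hfind] at hloop
  simp only [solution, solution_alt, if_neg hN, habs, hcv, ← hcs]
  rw [if_pos (show (0:Int) ≤ N by omega), if_neg (by decide), hloop,
    joinA_eq cs hdig _, cands_eq cs, max_cands cs]

lemma main_neg (N : Int) (hN : N < 0) : solution N = solution_alt N := by
  have hcv : (fun c => (PySem.Int.ofChars? [c]).getD 0) = cval := rfl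
  have habs : |N| = -N := abs_of_neg hN
  have hdig := toChars_mem (-N) (by omega)
  set cs := PySem.Int.toChars (-N) with hcs
  have hp1 : ∀ d : Int, (((1:Int) == 0 && decide (d < 5)) || ((1:Int) == 1 && decide (d > 5)))
      = decide (d > 5) := by intro d; simp
  have hloop := loopA_spec 1 (fun d => decide (d > 5)) hp1 (cs.map cval) 0 (Nat.zero_le _)
  rw [List.drop_zero, Nat.zero_add] at hloop
  have hfind : (cs.map cval).findIdx (fun d => decide (d > 5))
      = cs.findIdx (fun c => decide ('5' < c)) := by
    rw [List.findIdx_map]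
    exact findIdx_congr_mem _ _ cs (fun c hc => cval_gt5 c (hdig c hc))
  rw [hfind] at hloop
  simp only [solution, solution_alt, if_pos hN, habs, hcv, ← hcs]
  rw [if_neg (show ¬ (0:Int) ≤ N by omega), if_pos (by decide), hloop,
    joinA_eq cs hdig _, cands_eq cs, min_cands cs]

theorem solution_spec : Claim_equal_solution := by
  unfold Claim_equal_solution Spec_solution
  intro N _
  by_cases hN : N < 0
  · exact main_neg N hN
  · exact main_pos N hN
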